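-- pv_equiv track=rewrite | github.com/swuyyuru24/GoEmotions-using-BERT-and-ANN | req_library_loading.py | EmotionMapping
-- ===== SOURCE A (Python) =====
-- def EmotionMapping(emotion_list):
--     map_list = []
--
--     for i in emotion_list:
--         if i in ekman_mapping['anger']:
--             map_list.append('anger')
--         if i in ekman_mapping['disgust']:
--             map_list.append('disgust')
--         if i in ekman_mapping['fear']:
--             map_list.append('fear')
--         if i in ekman_mapping['joy']:
--             map_list.append('joy')
--         if i in ekman_mapping['sadness']:
--             map_list.append('sadness')
--         if i in ekman_mapping['surprise']:
--             map_list.append('surprise')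
--         if i == 'neutral':
--             map_list.append('neutral')
--
--     return map_list
--
-- ekman_mapping = dict({"anger": ["anger", "annoyance", "disapproval"],
--                       "disgust": ["disgust"],
--                       "fear": ["fear", "nervousness"],
--                       "joy": ["joy", "amusement", "approval", "excitement", "gratitude",  "love", "optimism",
--                               "relief", "pride", "admiration", "desire", "caring"],
--                       "sadness": ["sadness", "disappointment", "embarrassment", "grief",  "remorse"],
--                       "surprise": ["surprise", "realization", "confusion", "curiosity"],
--                       "neutral": ['neutral']})
-- ===== SOURCE B (Python) =====
-- ekman_mapping = dict({"anger": ["anger", "annoyance", "disapproval"],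
--                       "disgust": ["disgust"],
--                       "fear": ["fear", "nervousness"],
--                       "joy": ["joy", "amusement", "approval", "excitement", "gratitude",  "love", "optimism",
--                               "relief", "pride", "admiration", "desire", "caring"],
--                       "sadness": ["sadness", "disappointment", "embarrassment", "grief",  "remorse"],
--                       "surprise": ["surprise", "realization", "confusion", "curiosity"],
--                       "neutral": ['neutral']})
--
--
-- def EmotionMapping(emotion_list):
--     # Build the reverse lookup once: emotion -> Ekman category.
--     reverse = {e: cat for cat, emotions in ekman_mapping.items() for e in emotions}
--     # One pass: keep only known emotions, mapped to their category.
--     return [reverse[i] for i in emotion_list if i in reverse]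
-- ===== Notes on version B (the rewrite author's own statement) =====
-- stated objective: faster
-- what changed: Replaces A's seven per-element membership scans of the category lists with a reverse emotion-to-category lookup table built once from ekman_mapping.items(), followed by a single filter-and-map comprehension over the input.
import Mathlib
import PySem

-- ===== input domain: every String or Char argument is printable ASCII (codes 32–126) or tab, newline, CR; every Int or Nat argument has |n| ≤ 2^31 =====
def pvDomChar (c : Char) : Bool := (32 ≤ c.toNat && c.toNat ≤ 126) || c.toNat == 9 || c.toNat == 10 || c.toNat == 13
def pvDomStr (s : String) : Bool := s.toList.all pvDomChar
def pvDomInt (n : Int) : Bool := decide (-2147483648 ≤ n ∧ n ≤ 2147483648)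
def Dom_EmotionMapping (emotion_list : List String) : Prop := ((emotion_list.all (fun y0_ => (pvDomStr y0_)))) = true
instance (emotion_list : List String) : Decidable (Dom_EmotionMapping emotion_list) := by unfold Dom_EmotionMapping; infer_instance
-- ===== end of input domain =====

-- B replaces A's seven per-element membership scans by a reverse-lookup table built once
-- plus a single filter-and-map pass (objective: faster, measured). Same return value everywhere.

-- ===== PORT A =====
def ekman_anger : List String := ["anger", "annoyance", "disapproval"]
def ekman_disgust : List String := ["disgust"]
def ekman_fear : List String := ["fear", "nervousness"]
def ekman_joy : List String := ["joy", "amusement", "approval", "excitement", "gratitude", "love", "optimism", "relief", "pride", "admiration", "desire", "caring"]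
def ekman_sadness : List String := ["sadness", "disappointment", "embarrassment", "grief", "remorse"]
def ekman_surprise : List String := ["surprise", "realization", "confusion", "curiosity"]

def EmotionMapping (emotion_list : List String) : List String :=
  emotion_list.foldl (fun map_list i =>
    let map_list := if i ∈ ekman_anger then map_list ++ ["anger"] else map_list
    let map_list := if i ∈ ekman_disgust then map_list ++ ["disgust"] else map_list
    let map_list := if i ∈ ekman_fear then map_list ++ ["fear"] else map_list
    let map_list := if i ∈ ekman_joy then map_list ++ ["joy"] else map_list
    let map_list := if i ∈ ekman_sadness then map_list ++ ["sadness"] else map_list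
    let map_list := if i ∈ ekman_surprise then map_list ++ ["surprise"] else map_list
    let map_list := if i = "neutral" then map_list ++ ["neutral"] else map_list
    map_list) []

-- ===== PORT B =====
-- ekman_mapping.items(), in insertion order
def ekmanItems : List (String × List String) :=
  [("anger", ekman_anger), ("disgust", ekman_disgust), ("fear", ekman_fear),
   ("joy", ekman_joy), ("sadness", ekman_sadness), ("surprise", ekman_surprise),
   ("neutral", ["neutral"])]

-- the dict comprehension: emotion -> category (keys are distinct, so first match = the match)
def reverseMap : List (String × String) :=
  ekmanItems.flatMap (fun kv => kv.2.map (fun e => (e, kv.1)))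

-- dict membership/lookup (first match)
def revLookup : List (String × String) → String → Option String
  | [], _ => none
  | (e, c) :: rest, s => if s = e then some c else revLookup rest s

def EmotionMapping_alt (emotion_list : List String) : List String :=
  emotion_list.filterMap (fun i => revLookup reverseMap i)

-- ===== PRECONDITION & SPEC =====
def Spec_EmotionMapping (emotion_list : List String) (out : List String) : Prop := out = EmotionMapping_alt emotion_list
instance (emotion_list : List String) (out : List String) : Decidable (Spec_EmotionMapping emotion_list out) := by unfold Spec_EmotionMapping; infer_instance

-- ===== CLAIM (what is proved, stated in full; the proofs are below) =====
def Claim_equal_EmotionMapping : Prop := ∀ (emotion_list : List String), Dom_EmotionMapping emotion_list → Spec_EmotionMapping emotion_list (EmotionMapping emotion_list)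

-- ===== LEMMAS AND PROOFS =====

-- what A appends for one element, as a function of the reverse lookup
def stepOne (i : String) : List String := (revLookup reverseMap i).toList

-- A's loop body appends exactly stepOne i
theorem bodyA_eq (acc : List String) (i : String) :
    (let m := if i ∈ ekman_anger then acc ++ ["anger"] else acc
     let m := if i ∈ ekman_disgust then m ++ ["disgust"] else m
     let m := if i ∈ ekman_fear then m ++ ["fear"] else m
     let m := if i ∈ ekman_joy then m ++ ["joy"] else m
     let m := if i ∈ ekman_sadness then m ++ ["sadness"] else m
     let m := if i ∈ ekman_surprise then m ++ ["surprise"] else m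
     let m := if i = "neutral" then m ++ ["neutral"] else m
     m) = acc ++ stepOne i := by
  by_cases h0 : i = "anger"
  · subst h0; simp [ekman_anger, ekman_disgust, ekman_fear, ekman_joy, ekman_sadness, ekman_surprise, stepOne, reverseMap, ekmanItems, revLookup]
  by_cases h1 : i = "annoyance"
  · subst h1; simp [ekman_anger, ekman_disgust, ekman_fear, ekman_joy, ekman_sadness, ekman_surprise, stepOne, reverseMap, ekmanItems, revLookup]
  by_cases h2 : i = "disapproval"
  · subst h2; simp [ekman_anger, ekman_disgust, ekman_fear, ekman_joy, ekman_sadness, ekman_surprise, stepOne, reverseMap, ekmanItems, revLookup]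
  by_cases h3 : i = "disgust"
  · subst h3; simp [ekman_anger, ekman_disgust, ekman_fear, ekman_joy, ekman_sadness, ekman_surprise, stepOne, reverseMap, ekmanItems, revLookup]
  by_cases h4 : i = "fear"
  · subst h4; simp [ekman_anger, ekman_disgust, ekman_fear, ekman_joy, ekman_sadness, ekman_surprise, stepOne, reverseMap, ekmanItems, revLookup]
  by_cases h5 : i = "nervousness"
  · subst h5; simp [ekman_anger, ekman_disgust, ekman_fear, ekman_joy, ekman_sadness, ekman_surprise, stepOne, reverseMap, ekmanItems, revLookup]
  by_cases h6 : i = "joy"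
  · subst h6; simp [ekman_anger, ekman_disgust, ekman_fear, ekman_joy, ekman_sadness, ekman_surprise, stepOne, reverseMap, ekmanItems, revLookup]
  by_cases h7 : i = "amusement"
  · subst h7; simp [ekman_anger, ekman_disgust, ekman_fear, ekman_joy, ekman_sadness, ekman_surprise, stepOne, reverseMap, ekmanItems, revLookup]
  by_cases h8 : i = "approval"
  · subst h8; simp [ekman_anger, ekman_disgust, ekman_fear, ekman_joy, ekman_sadness, ekman_surprise, stepOne, reverseMap, ekmanItems, revLookup]
  by_cases h9 : i = "excitement"
  · subst h9; simp [ekman_anger, ekman_disgust, ekman_fear, ekman_joy, ekman_sadness, ekman_surprise, stepOne, reverseMap, ekmanItems, revLookup]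
  by_cases h10 : i = "gratitude"
  · subst h10; simp [ekman_anger, ekman_disgust, ekman_fear, ekman_joy, ekman_sadness, ekman_surprise, stepOne, reverseMap, ekmanItems, revLookup]
  by_cases h11 : i = "love"
  · subst h11; simp [ekman_anger, ekman_disgust, ekman_fear, ekman_joy, ekman_sadness, ekman_surprise, stepOne, reverseMap, ekmanItems, revLookup]
  by_cases h12 : i = "optimism"
  · subst h12; simp [ekman_anger, ekman_disgust, ekman_fear, ekman_joy, ekman_sadness, ekman_surprise, stepOne, reverseMap, ekmanItems, revLookup]
  by_cases h13 : i = "relief"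
  · subst h13; simp [ekman_anger, ekman_disgust, ekman_fear, ekman_joy, ekman_sadness, ekman_surprise, stepOne, reverseMap, ekmanItems, revLookup]
  by_cases h14 : i = "pride"
  · subst h14; simp [ekman_anger, ekman_disgust, ekman_fear, ekman_joy, ekman_sadness, ekman_surprise, stepOne, reverseMap, ekmanItems, revLookup]
  by_cases h15 : i = "admiration"
  · subst h15; simp [ekman_anger, ekman_disgust, ekman_fear, ekman_joy, ekman_sadness, ekman_surprise, stepOne, reverseMap, ekmanItems, revLookup]
  by_cases h16 : i = "desire"
  · subst h16; simp [ekman_anger, ekman_disgust, ekman_fear, ekman_joy, ekman_sadness, ekman_surprise, stepOne, reverseMap, ekmanItems, revLookup]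
  by_cases h17 : i = "caring"
  · subst h17; simp [ekman_anger, ekman_disgust, ekman_fear, ekman_joy, ekman_sadness, ekman_surprise, stepOne, reverseMap, ekmanItems, revLookup]
  by_cases h18 : i = "sadness"
  · subst h18; simp [ekman_anger, ekman_disgust, ekman_fear, ekman_joy, ekman_sadness, ekman_surprise, stepOne, reverseMap, ekmanItems, revLookup]
  by_cases h19 : i = "disappointment"
  · subst h19; simp [ekman_anger, ekman_disgust, ekman_fear, ekman_joy, ekman_sadness, ekman_surprise, stepOne, reverseMap, ekmanItems, revLookup]
  by_cases h20 : i = "embarrassment"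
  · subst h20; simp [ekman_anger, ekman_disgust, ekman_fear, ekman_joy, ekman_sadness, ekman_surprise, stepOne, reverseMap, ekmanItems, revLookup]
  by_cases h21 : i = "grief"
  · subst h21; simp [ekman_anger, ekman_disgust, ekman_fear, ekman_joy, ekman_sadness, ekman_surprise, stepOne, reverseMap, ekmanItems, revLookup]
  by_cases h22 : i = "remorse"
  · subst h22; simp [ekman_anger, ekman_disgust, ekman_fear, ekman_joy, ekman_sadness, ekman_surprise, stepOne, reverseMap, ekmanItems, revLookup]
  by_cases h23 : i = "surprise"
  · subst h23; simp [ekman_anger, ekman_disgust, ekman_fear, ekman_joy, ekman_sadness, ekman_surprise, stepOne, reverseMap, ekmanItems, revLookup]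
  by_cases h24 : i = "realization"
  · subst h24; simp [ekman_anger, ekman_disgust, ekman_fear, ekman_joy, ekman_sadness, ekman_surprise, stepOne, reverseMap, ekmanItems, revLookup]
  by_cases h25 : i = "confusion"
  · subst h25; simp [ekman_anger, ekman_disgust, ekman_fear, ekman_joy, ekman_sadness, ekman_surprise, stepOne, reverseMap, ekmanItems, revLookup]
  by_cases h26 : i = "curiosity"
  · subst h26; simp [ekman_anger, ekman_disgust, ekman_fear, ekman_joy, ekman_sadness, ekman_surprise, stepOne, reverseMap, ekmanItems, revLookup]
  by_cases h27 : i = "neutral"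
  · subst h27; simp [ekman_anger, ekman_disgust, ekman_fear, ekman_joy, ekman_sadness, ekman_surprise, stepOne, reverseMap, ekmanItems, revLookup]
  · simp [ekman_anger, ekman_disgust, ekman_fear, ekman_joy, ekman_sadness, ekman_surprise, stepOne, reverseMap, ekmanItems, revLookup, h0, h1, h2, h3, h4, h5, h6, h7, h8, h9, h10, h11, h12, h13, h14, h15, h16, h17, h18, h19, h20, h21, h22, h23, h24, h25, h26, h27]

theorem filterMap_eq_flatMap_toList (l : List String) (f : String → Option String) :
    l.filterMap f = l.flatMap (fun i => (f i).toList) := by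
  induction l with
  | nil => rfl
  | cons x xs ih =>
    cases h : f x <;> simp [h, ih]

-- ===== VERDICT (by name: the statement is the Claim_ definition above) =====
theorem EmotionMapping_spec : Claim_equal_EmotionMapping := by
  intro emotion_list _
  unfold Spec_EmotionMapping EmotionMapping EmotionMapping_alt
  have hbody : (fun (map_list : List String) (i : String) =>
      let m := if i ∈ ekman_anger then map_list ++ ["anger"] else map_list
      let m := if i ∈ ekman_disgust then m ++ ["disgust"] else m
      let m := if i ∈ ekman_fear then m ++ ["fear"] else m
      let m := if i ∈ ekman_joy then m ++ ["joy"] else m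
      let m := if i ∈ ekman_sadness then m ++ ["sadness"] else m
      let m := if i ∈ ekman_surprise then m ++ ["surprise"] else m
      let m := if i = "neutral" then m ++ ["neutral"] else m
      m) = fun acc i => acc ++ stepOne i := by
    funext acc i; exact bodyA_eq acc i
  rw [hbody, PySem.List.foldl_append_eq_flatMap, filterMap_eq_flatMap_toList]
  rfl
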